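-- pv_equiv track=rewrite | github.com/sbmarriott/nltk | chapter3.py | hedge
-- ===== SOURCE A (Python) =====
-- def hedge(text):
--     like_text = []
--     word = 0
--     for w in text:
--         like_text.append(w)
--         word = word + 1
--         if word % 3 == 0:
--             like_text.append('like')
--     return like_text
-- ===== SOURCE B (Python) =====
-- def hedge(text):
--     out = []
--     i = 0
--     while i < len(text):
--         chunk = text[i:i+3]
--         out.extend(chunk)
--         if len(chunk) == 3:
--             out.append('like')
--         i += 3
--     return out
-- ===== Notes on version B (the rewrite author's own statement) =====
-- stated objective: alternative
-- what changed: Replaces the per-word counter with a modulo test by a while-loop that slices the input in blocks of three and appends 'like' after each full block, keeping no running word count.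
import Mathlib
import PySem

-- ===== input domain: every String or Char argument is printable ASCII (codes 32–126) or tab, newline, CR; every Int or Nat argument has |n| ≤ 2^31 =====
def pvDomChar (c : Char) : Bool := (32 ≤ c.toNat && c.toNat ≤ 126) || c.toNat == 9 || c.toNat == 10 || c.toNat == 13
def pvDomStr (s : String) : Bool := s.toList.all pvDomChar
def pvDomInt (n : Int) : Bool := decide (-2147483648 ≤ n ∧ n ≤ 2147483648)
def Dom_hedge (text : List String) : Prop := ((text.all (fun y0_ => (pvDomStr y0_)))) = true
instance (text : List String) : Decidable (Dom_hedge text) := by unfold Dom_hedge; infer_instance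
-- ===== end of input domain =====

-- B replaces A's per-word counter and modulo test by a while-loop that slices the input in blocks of three (alternative decomposition, same cost).


-- ===== PORT A =====
-- the for-loop with state (like_text, word)
def hedgeLoop : List String → List String → Int → List String
  | [], likeText, _ => likeText
  | w :: rest, likeText, word =>
      let likeText := likeText ++ [w]
      let word := word + 1
      if PySem.Int.mod word 3 = 0 then hedgeLoop rest (likeText ++ ["like"]) word
      else hedgeLoop rest likeText word

def hedge (text : List String) : List String := hedgeLoop text [] 0

-- ===== PORT B =====
-- the while-loop: i stays a natural number (starts at 0, only ever += 3), so it is carried as Nat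
def altLoop (text : List String) (out : List String) (i : Nat) : List String :=
  if i < text.length then
    let chunk := PySem.List.slice text (some (i : Int)) (some ((i : Int) + 3))
    let out := out ++ chunk
    let out := if chunk.length = 3 then out ++ ["like"] else out
    altLoop text out (i + 3)
  else out
termination_by text.length - i

def hedge_alt (text : List String) : List String := altLoop text [] 0

-- ===== PRECONDITION & SPEC =====
def Spec_hedge (text : List String) (out : List String) : Prop := out = hedge_alt text
instance (text : List String) (out : List String) : Decidable (Spec_hedge text out) := by unfold Spec_hedge; infer_instance

-- ===== CLAIM (what is proved, stated in full; the proofs are below) =====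
def Claim_equal_hedge : Prop := ∀ (text : List String), Dom_hedge text → Spec_hedge text (hedge text)

-- ===== LEMMAS AND PROOFS =====
-- proof helper: the common recursive shape both loops compute (three words per block)
def chunkRec : List String → List String
  | a :: b :: c :: rest => a :: b :: c :: "like" :: chunkRec rest
  | xs => xs

theorem hedgeLoop_eq (text : List String) : ∀ (acc : List String) (word : Int),
    PySem.Int.mod word 3 = 0 → hedgeLoop text acc word = acc ++ chunkRec text := by
  induction text using chunkRec.induct with
  | case1 a b c rest ih =>
      intro acc word h
      rw [PySem.Int.mod_eq_zero_iff_dvd] at h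
      have h1 : ¬(3:Int) ∣ (word + 1) := by omega
      have h2 : ¬(3:Int) ∣ (word + 1 + 1) := by omega
      have h4 : (3:Int) ∣ (word + 1 + 1 + 1) := by omega
      have h4' : PySem.Int.mod (word + 1 + 1 + 1) 3 = 0 := by
        rw [PySem.Int.mod_eq_zero_iff_dvd]; exact h4
      simp only [hedgeLoop, PySem.Int.mod_eq_zero_iff_dvd, if_neg h1, if_neg h2, if_pos h4]
      rw [ih _ _ h4']
      simp [chunkRec]
  | case2 xs hne =>
      intro acc word h
      rw [PySem.Int.mod_eq_zero_iff_dvd] at h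
      match xs, hne with
      | [], _ => simp [hedgeLoop, chunkRec]
      | [a], _ =>
          have h1 : ¬(3:Int) ∣ (word + 1) := by omega
          simp [hedgeLoop, PySem.Int.mod_eq_zero_iff_dvd, h1, chunkRec]
      | [a, b], _ =>
          have h1 : ¬(3:Int) ∣ (word + 1) := by omega
          have h2 : ¬(3:Int) ∣ (word + 1 + 1) := by omega
          simp [hedgeLoop, PySem.Int.mod_eq_zero_iff_dvd, h1, h2, chunkRec]
      | a :: b :: c :: r, hne => exact absurd rfl (hne a b c r)

theorem slice_chunk (text : List String) (i : Nat) :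
    PySem.List.slice text (some (i : Int)) (some ((i : Int) + 3)) = (text.drop i).take 3 := by
  have : ((i : Int) + 3) = (((i + 3 : Nat) : Int)) := by push_cast; ring
  rw [this, PySem.List.slice_natCast]
  congr 1
  omega

theorem altLoop_eq (text : List String) : ∀ (i : Nat) (out : List String),
    altLoop text out i = out ++ chunkRec (text.drop i) := by
  intro i
  induction hn : text.length - i using Nat.strong_induction_on generalizing i with
  | _ n ih =>
      intro out
      rw [altLoop]
      by_cases hlt : i < text.length
      · simp only [if_pos hlt, slice_chunk]
        have hdd : text.drop (i + 3) = (text.drop i).drop 3 := by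
          rw [List.drop_drop]
        rcases hd : text.drop i with _ | ⟨a, t1⟩
        · exfalso
          have h0 : (text.drop i).length = 0 := by rw [hd]; rfl
          rw [List.length_drop] at h0; omega
        rcases t1 with _ | ⟨b, t2⟩
        · rw [ih (text.length - (i + 3)) (by omega) (i + 3) rfl, hdd, hd]
          simp [chunkRec]
        rcases t2 with _ | ⟨c, t3⟩
        · rw [ih (text.length - (i + 3)) (by omega) (i + 3) rfl, hdd, hd]
          simp [chunkRec]
        · rw [ih (text.length - (i + 3)) (by omega) (i + 3) rfl, hdd, hd]
          simp [chunkRec]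
      · have : text.drop i = [] := by
          apply List.drop_eq_nil_of_le; omega
        simp [if_neg hlt, this, chunkRec]

-- ===== VERDICT (by name: the statement is the Claim_ definition above) =====
theorem hedge_spec : Claim_equal_hedge := by
  intro text _
  unfold Spec_hedge hedge hedge_alt
  rw [hedgeLoop_eq text [] 0 (by decide), altLoop_eq text 0 []]
  simp
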